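-- pv_equiv track=rewrite | github.com/FlorianLeveil/FOOTBALLPROJECT_SCHEDULER | game/game.py | compute_which_pass_is_possible
-- ===== SOURCE A (Python) =====
-- def compute_which_pass_is_possible(dict_of_position_to_give):
--     _can_short_pass = False
--     _can_medium_pass = False
--     _can_long_pass = False
--
--     for pass_type, to_position in dict_of_position_to_give.items():
--         if pass_type == 'SHORT' and to_position != ['']:
--             _can_short_pass = True
--         elif pass_type == 'MEDIUM' and to_position != ['']:
--             _can_medium_pass = True
--         elif pass_type == 'LONG' and to_position != ['']:
--             _can_long_pass = True
--         else:
--             continue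
--
--     return _can_short_pass, _can_medium_pass, _can_long_pass
-- ===== SOURCE B (Python) =====
-- def compute_which_pass_is_possible(dict_of_position_to_give):
--     def possible(kind):
--         return any(v != [''] for k, v in dict_of_position_to_give.items() if k == kind)
--     return possible('SHORT'), possible('MEDIUM'), possible('LONG')
-- ===== Notes on version B (the rewrite author's own statement) =====
-- stated objective: idiomatic
-- what changed: A's single scan mutating three boolean flags becomes three independent staged any-passes, one per pass kind, with no mutable state; correct because A's flag for a kind is set iff some item of that kind has a value other than [''].
import Mathlib
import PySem

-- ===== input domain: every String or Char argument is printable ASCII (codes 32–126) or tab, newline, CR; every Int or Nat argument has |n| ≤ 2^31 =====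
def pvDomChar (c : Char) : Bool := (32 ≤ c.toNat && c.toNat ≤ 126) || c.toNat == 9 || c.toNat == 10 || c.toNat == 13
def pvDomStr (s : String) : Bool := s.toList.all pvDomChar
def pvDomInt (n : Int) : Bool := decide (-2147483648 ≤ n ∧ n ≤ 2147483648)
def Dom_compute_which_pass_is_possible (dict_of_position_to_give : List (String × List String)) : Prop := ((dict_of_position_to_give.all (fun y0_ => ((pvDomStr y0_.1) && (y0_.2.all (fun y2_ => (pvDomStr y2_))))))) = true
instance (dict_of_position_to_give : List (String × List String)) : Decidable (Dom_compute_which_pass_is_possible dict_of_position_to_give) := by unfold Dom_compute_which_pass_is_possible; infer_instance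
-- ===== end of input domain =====

-- B replaces A's single flag-mutating scan by three staged any-passes, one per pass kind (idiomatic; same result).


-- ===== PORT A =====
-- loop body: one iteration of "for pass_type, to_position in …items():"
def passStep (acc : Bool × Bool × Bool) (kv : String × List String) : Bool × Bool × Bool :=
  if kv.1 == "SHORT" && kv.2 != [""] then (true, acc.2.1, acc.2.2)
  else if kv.1 == "MEDIUM" && kv.2 != [""] then (acc.1, true, acc.2.2)
  else if kv.1 == "LONG" && kv.2 != [""] then (acc.1, acc.2.1, true)
  else acc

def compute_which_pass_is_possible (dict_of_position_to_give : List (String × List String)) : Bool × Bool × Bool :=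
  dict_of_position_to_give.foldl passStep (false, false, false)

-- ===== PORT B =====
-- possible(kind) = any(v != [''] for k, v in items if k == kind): filter then any
def passPossible (dict_of_position_to_give : List (String × List String)) (kind : String) : Bool :=
  (dict_of_position_to_give.filter (fun kv => kv.1 == kind)).any (fun kv => kv.2 != [""])

def compute_which_pass_is_possible_alt (dict_of_position_to_give : List (String × List String)) : Bool × Bool × Bool :=
  (passPossible dict_of_position_to_give "SHORT",
   passPossible dict_of_position_to_give "MEDIUM",
   passPossible dict_of_position_to_give "LONG")

-- ===== PRECONDITION & SPEC =====
def Spec_compute_which_pass_is_possible (dict_of_position_to_give : List (String × List String)) (out : Bool × Bool × Bool) : Prop := out = compute_which_pass_is_possible_alt dict_of_position_to_give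
instance (dict_of_position_to_give : List (String × List String)) (out : Bool × Bool × Bool) : Decidable (Spec_compute_which_pass_is_possible dict_of_position_to_give out) := by unfold Spec_compute_which_pass_is_possible; infer_instance

-- ===== CLAIM (what is proved, stated in full; the proofs are below) =====
def Claim_equal_compute_which_pass_is_possible : Prop := ∀ (dict_of_position_to_give : List (String × List String)), Dom_compute_which_pass_is_possible dict_of_position_to_give → Spec_compute_which_pass_is_possible dict_of_position_to_give (compute_which_pass_is_possible dict_of_position_to_give)

-- ===== LEMMAS AND PROOFS =====

-- A's loop, from any accumulator, ORs onto it the per-kind "any" of the remaining items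
theorem foldA_eq (xs : List (String × List String)) (acc : Bool × Bool × Bool) :
    xs.foldl passStep acc
    = (acc.1 || passPossible xs "SHORT",
       acc.2.1 || passPossible xs "MEDIUM",
       acc.2.2 || passPossible xs "LONG") := by
  induction xs generalizing acc with
  | nil => simp [passPossible]
  | cons p rest ih =>
    obtain ⟨k, v⟩ := p
    simp only [List.foldl_cons]
    rw [ih]
    by_cases hS : k = "SHORT"
    · subst hS
      by_cases hv : v = [""] <;> simp [passStep, passPossible, hv]
    · by_cases hM : k = "MEDIUM"
      · subst hM
        by_cases hv : v = [""] <;> simp [passStep, passPossible, hv]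
      · by_cases hL : k = "LONG"
        · subst hL
          by_cases hv : v = [""] <;> simp [passStep, passPossible, hv]
        · simp [passStep, passPossible, hS, hM, hL]

-- ===== VERDICT (by name: the statement is the Claim_ definition above) =====
theorem compute_which_pass_is_possible_spec : Claim_equal_compute_which_pass_is_possible := by
  intro xs _
  unfold Spec_compute_which_pass_is_possible
  unfold compute_which_pass_is_possible compute_which_pass_is_possible_alt
  rw [foldA_eq xs (false, false, false)]
  simp
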